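-- pv_equiv track=rewrite | github.com/world-dv/Python_Programmers | 코딩 기초 트레이닝/Day07/Creating an Array 4.py | solution
-- ===== SOURCE A (Python) =====
-- def solution(arr):
--     stk = []
--     i = 0
--     while True :
--         if i == len(arr) :
--             break
--         if not stk :
--             stk.append(arr[i])
--             i += 1
--         else :
--             if stk[-1] < arr[i] :
--                 stk.append(arr[i])
--                 i += 1
--             else :
--                 stk.remove(stk[-1])
--
--     return stk
-- ===== SOURCE B (Python) =====
-- def solution(arr):
--     # The final stack is exactly the strict suffix-minima of arr:
--     # one right-to-left pass keeping a running minimum.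
--     res = []
--     cur = None
--     for x in reversed(arr):
--         if cur is None or x < cur:
--             res.append(x)
--             cur = x
--     res.reverse()
--     return res
-- ===== Notes on version B (the rewrite author's own statement) =====
-- stated objective: faster
-- what changed: Replaces the push/pop monotonic stack (which revisits the same element while popping) by a single right-to-left pass tracking one running minimum, since the final stack is exactly the strict suffix-minima of arr.
import Mathlib
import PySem

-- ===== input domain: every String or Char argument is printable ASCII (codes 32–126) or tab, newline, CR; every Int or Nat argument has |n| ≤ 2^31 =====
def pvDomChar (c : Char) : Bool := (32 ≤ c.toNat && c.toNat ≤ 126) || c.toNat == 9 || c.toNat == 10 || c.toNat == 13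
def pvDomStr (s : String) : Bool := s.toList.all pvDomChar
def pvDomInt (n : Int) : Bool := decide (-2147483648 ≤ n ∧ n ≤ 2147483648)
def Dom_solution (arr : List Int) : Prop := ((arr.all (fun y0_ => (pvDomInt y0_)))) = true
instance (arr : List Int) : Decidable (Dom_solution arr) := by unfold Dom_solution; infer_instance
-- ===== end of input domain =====

-- B replaces A's push/pop monotonic stack by one right-to-left pass tracking a running minimum.

-- ===== PORT A =====
-- helpers needed by the port's decreasing_by: stk.remove(stk[-1]) shortens a nonempty stack
theorem pvGetLast!_int_eq (l : List Int) (h : l ≠ []) : l.getLast! = l.getLast h := by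
  cases l with
  | nil => exact absurd rfl h
  | cons a t => simp [List.getLast!]

theorem pvRemoveLast_len (stk : List Int) (h : stk ≠ []) :
    ((PySem.List.remove? stk stk.getLast!).getD []).length < stk.length := by
  have hm : stk.getLast! ∈ stk := by
    rw [pvGetLast!_int_eq stk h]; exact List.getLast_mem h
  rw [PySem.List.remove?_eq_some_erase _ _ hm]
  simp only [Option.getD_some]
  rw [List.length_erase_of_mem hm]
  have : stk.length ≠ 0 := by simpa using h
  omega

-- A's while loop: the index i becomes the remaining suffix arr[i:]; stack kept in Python order
-- (bottom first), stk[-1] = getLast!, stk.remove(stk[-1]) = PySem.List.remove? (always found here)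
def solutionGo : List Int → List Int → List Int
  | [], stk => stk
  | x :: rest, stk =>
    if stk = [] then solutionGo rest (stk ++ [x])
    else if stk.getLast! < x then solutionGo rest (stk ++ [x])
    else solutionGo (x :: rest) ((PySem.List.remove? stk stk.getLast!).getD [])
termination_by rest stk => rest.length * 2 + stk.length
decreasing_by
  · simp; omega
  · simp; omega
  · have := pvRemoveLast_len stk (by assumption); simp only [List.length_cons]; omega

def solution (arr : List Int) : List Int := solutionGo arr []

-- ===== PORT B =====
-- B's for-loop over reversed(arr): cur is the running minimum (None sentinel), res grows at the end
def altGo : List Int → Option Int → List Int → List Int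
  | [], _, res => res
  | x :: l, cur, res =>
    if (match cur with | none => true | some m => decide (x < m)) then
      altGo l (some x) (res ++ [x])
    else
      altGo l cur res

def solution_alt (arr : List Int) : List Int := (altGo arr.reverse none []).reverse

-- ===== PRECONDITION & SPEC =====
def Spec_solution (arr : List Int) (out : List Int) : Prop := out = solution_alt arr
instance (arr : List Int) (out : List Int) : Decidable (Spec_solution arr out) := by unfold Spec_solution; infer_instance

-- ===== CLAIM (what is proved, stated in full; the proofs are below) =====
def Claim_equal_solution : Prop := ∀ (arr : List Int), Dom_solution arr → Spec_solution arr (solution arr)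

-- ===== LEMMAS AND PROOFS =====

-- common specification: the elements that are strictly smaller than everything after them
def spec : List Int → List Int
  | [] => []
  | x :: xs => if ∀ y ∈ xs, x < y then x :: spec xs else spec xs

theorem spec_mem {y : Int} : ∀ {l : List Int}, y ∈ spec l → y ∈ l := by
  intro l
  induction l with
  | nil => simp [spec]
  | cons x xs ih =>
    simp only [spec]
    split <;> intro h
    · rcases List.mem_cons.mp h with h | h
      · simp [h]
      · exact List.mem_cons_of_mem _ (ih h)
    · exact List.mem_cons_of_mem _ (ih h)

theorem spec_sorted : ∀ l : List Int, List.Pairwise (· < ·) (spec l) := by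
  intro l
  induction l with
  | nil => simp [spec]
  | cons x xs ih =>
    simp only [spec]
    split
    · rename_i hall
      exact List.pairwise_cons.mpr ⟨fun y hy => hall y (spec_mem hy), ih⟩
    · exact ih

theorem spec_append (l : List Int) (x : Int) :
    spec (l ++ [x]) = (spec l).filter (fun y => decide (y < x)) ++ [x] := by
  induction l with
  | nil => simp [spec]
  | cons a as ih =>
    rw [List.cons_append]
    by_cases hax : a < x
    · by_cases hall : ∀ y ∈ as, a < y
      · have h2 : ∀ y ∈ as ++ [x], a < y := by
          intro y hy
          rcases List.mem_append.mp hy with h | h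
          · exact hall y h
          · simp at h; omega
        simp only [spec, if_pos hall, if_pos h2, ih]
        simp [hax]
      · have h2 : ¬ ∀ y ∈ as ++ [x], a < y := by
          intro hc; exact hall (fun y hy => hc y (List.mem_append_left _ hy))
        simp only [spec, if_neg hall, if_neg h2, ih]
    · have h2 : ¬ ∀ y ∈ as ++ [x], a < y := by
        intro hc; exact hax (hc x (by simp))
      by_cases hall : ∀ y ∈ as, a < y
      · simp only [spec, if_pos hall, if_neg h2, ih]
        simp [hax]
      · simp only [spec, if_neg hall, if_neg h2, ih]

-- the one-step effect of A's inner popping, on the reversed (top-at-head) stack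
def pushPop : List Int → Int → List Int
  | [], x => [x]
  | t :: r, x => if t < x then x :: t :: r else pushPop r x

theorem pushPop_sorted (r : List Int) (x : Int) (h : List.Pairwise (· > ·) r) :
    pushPop r x = x :: r.filter (fun y => decide (y < x)) := by
  induction r with
  | nil => simp [pushPop]
  | cons t r' ih =>
    rcases List.pairwise_cons.mp h with ⟨ht, hr'⟩
    by_cases htx : t < x
    · have hall : ∀ y ∈ r', decide (y < x) = true := by
        intro y hy; simp; have := ht y hy; omega
      simp [pushPop, htx, List.filter_eq_self.mpr hall]
    · simp [pushPop, htx, ih hr']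

-- elements of a (<)-sorted nonempty stack are ≤ its last element
theorem sorted_le_last (l : List Int) (b y : Int)
    (hs : List.Pairwise (· < ·) (l ++ [b])) (hy : y ∈ l ++ [b]) : y ≤ b := by
  rcases List.mem_append.mp hy with h | h
  · have := (List.pairwise_append.mp hs).2.2 y h b (by simp); omega
  · simp at h; omega

theorem sorted_le_getLast (stk : List Int) (h : stk ≠ [])
    (hs : List.Pairwise (· < ·) stk) : ∀ y ∈ stk, y ≤ stk.getLast! := by
  intro y hy
  rw [pvGetLast!_int_eq stk h]
  have hL := List.dropLast_append_getLast h
  exact sorted_le_last stk.dropLast (stk.getLast h) y (by rwa [hL]) (by rwa [hL])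

theorem sorted_reverse_last (stk : List Int) (h : stk ≠ []) :
    stk.reverse = stk.getLast! :: stk.dropLast.reverse := by
  conv_lhs => rw [← List.dropLast_append_getLast h]
  rw [pvGetLast!_int_eq stk h]
  simp

-- A's loop computes foldl pushPop on the reversed stack
theorem solutionGo_eq : ∀ (rest stk : List Int), List.Pairwise (· < ·) stk →
    solutionGo rest stk = (List.foldl pushPop stk.reverse rest).reverse := by
  intro rest stk
  induction rest, stk using solutionGo.induct with
  | case1 stk => intro _; simp [solutionGo]
  | case2 x rest ih =>
    intro _
    rw [solutionGo]
    simp only [reduceIte]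
    rw [ih (by simp)]
    simp [pushPop]
  | case3 x rest stk hnil hlt ih =>
    intro hs
    rw [solutionGo, if_neg hnil, if_pos hlt]
    have hall : ∀ y ∈ stk, y < x := by
      intro y hy
      have := sorted_le_getLast stk hnil hs y hy
      omega
    have hs' : List.Pairwise (· < ·) (stk ++ [x]) := by
      rw [List.pairwise_append]
      exact ⟨hs, by simp, by intro a ha b hb; simp at hb; subst hb; exact hall a ha⟩
    rw [ih hs', List.foldl_cons]
    have hpp : pushPop stk.reverse x = (stk ++ [x]).reverse := by
      rw [sorted_reverse_last stk hnil, pushPop, if_pos hlt,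
        ← sorted_reverse_last stk hnil]
      simp
    rw [hpp]
  | case4 x rest stk hnil hlt ih =>
    intro hs
    rw [solutionGo, if_neg hnil, if_neg hlt]
    have hm : stk.getLast! ∈ stk := by
      rw [pvGetLast!_int_eq stk hnil]; exact List.getLast_mem hnil
    have hnd : stk.Nodup := hs.nodup
    have hL := List.dropLast_append_getLast hnil
    have hnotmem : stk.getLast hnil ∉ stk.dropLast := by
      intro hmem
      have hnd2 : (stk.dropLast ++ [stk.getLast hnil]).Nodup := by rwa [hL]
      exact (List.disjoint_of_nodup_append hnd2) hmem (by simp)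
    have herase : stk.erase stk.getLast! = stk.dropLast := by
      rw [pvGetLast!_int_eq stk hnil]
      calc stk.erase (stk.getLast hnil)
          = (stk.dropLast ++ [stk.getLast hnil]).erase (stk.getLast hnil) := by rw [hL]
        _ = stk.dropLast := by
            rw [List.erase_append_right _ hnotmem]; simp
    have hrw : (PySem.List.remove? stk stk.getLast!).getD [] = stk.dropLast := by
      rw [PySem.List.remove?_eq_some_erase _ _ hm, Option.getD_some, herase]
    have hs' : List.Pairwise (· < ·) stk.dropLast := hs.sublist (List.dropLast_sublist _)
    rw [hrw] at ih ⊢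
    rw [ih hs', List.foldl_cons, List.foldl_cons]
    have hpp : pushPop stk.reverse x = pushPop stk.dropLast.reverse x := by
      rw [sorted_reverse_last stk hnil, pushPop, if_neg hlt]
    rw [hpp]

theorem foldl_pushPop_spec : ∀ l : List Int, List.foldl pushPop [] l = (spec l).reverse := by
  intro l
  induction l using List.reverseRecOn with
  | nil => simp [spec]
  | append_singleton l x ih =>
    rw [List.foldl_append, List.foldl_cons, List.foldl_nil, ih]
    have hsr : List.Pairwise (· > ·) (spec l).reverse := by
      rw [List.pairwise_reverse]
      exact spec_sorted l
    rw [pushPop_sorted _ _ hsr, spec_append]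
    simp

theorem solution_eq_spec (arr : List Int) : solution arr = spec arr := by
  unfold solution
  rw [solutionGo_eq arr [] (by simp), List.reverse_nil, foldl_pushPop_spec]
  simp

-- B-side: accumulator lemma and the right-append characterisation
theorem altGo_acc : ∀ (l : List Int) (c : Option Int) (res : List Int),
    altGo l c res = res ++ altGo l c [] := by
  intro l
  induction l with
  | nil => simp [altGo]
  | cons x l ih =>
    intro c res
    simp only [altGo]
    by_cases hk : (match c with | none => true | some m => decide (x < m)) = true
    · rw [if_pos hk, if_pos hk, ih _ (res ++ [x]), ih _ ([] ++ [x])]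
      simp
    · rw [if_neg hk, if_neg hk]
      exact ih _ _

def keepCond (a : Int) (l : List Int) (c : Option Int) : Bool :=
  l.all (fun y => decide (a < y)) && (match c with | none => true | some m => decide (a < m))

theorem altGo_snoc : ∀ (l : List Int) (c : Option Int) (a : Int),
    altGo (l ++ [a]) c [] = altGo l c [] ++ (if keepCond a l c then [a] else []) := by
  intro l
  induction l with
  | nil =>
    intro c a
    cases c with
    | none => simp [altGo, keepCond]
    | some m =>
      by_cases h : a < m <;> simp [altGo, keepCond, h]
  | cons x l ih =>
    intro c a
    rw [List.cons_append]
    simp only [altGo]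
    by_cases hk : (match c with | none => true | some m => decide (x < m)) = true
    · rw [if_pos hk, if_pos hk]
      rw [altGo_acc _ _ ([] ++ [x]), ih (some x) a, altGo_acc l (some x) ([] ++ [x])]
      have hcc : keepCond a l (some x) = keepCond a (x :: l) c := by
        cases c with
        | none =>
          simp [keepCond, Bool.and_comm]
        | some m =>
          have hxm : x < m := by simpa using hk
          simp only [keepCond, List.all_cons]
          by_cases hax : a < x
          · have ham : a < m := by omega
            simp [hax, ham]
          · simp [hax]
      rw [hcc]
      simp
    · rw [if_neg hk, if_neg hk]
      rw [ih c a]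
      have hcc : keepCond a l c = keepCond a (x :: l) c := by
        cases c with
        | none => simp at hk
        | some m =>
          have hmx : m ≤ x := by simpa using hk
          simp only [keepCond, List.all_cons]
          by_cases ham : a < m
          · have hax : a < x := by omega
            simp [hax, ham]
          · simp [ham]
      rw [hcc]

theorem alt_eq_spec (arr : List Int) : solution_alt arr = spec arr := by
  unfold solution_alt
  rw [List.reverse_eq_iff]
  induction arr with
  | nil => simp [altGo, spec]
  | cons a l ih =>
    rw [List.reverse_cons, altGo_snoc, ih]
    by_cases hall : ∀ y ∈ l, a < y
    · have hk : keepCond a l.reverse none = true := by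
        simp only [keepCond, List.all_reverse, Bool.and_true]
        rw [List.all_eq_true]
        intro y hy; simpa using hall y hy
      rw [if_pos hk]
      have hsp : spec (a :: l) = a :: spec l := by
        simp only [spec]; rw [if_pos hall]
      rw [hsp]
      simp
    · have hk : keepCond a l.reverse none = false := by
        simp only [keepCond, List.all_reverse, Bool.and_true]
        rw [List.all_eq_false]
        push Not at hall
        rcases hall with ⟨y, hy, hle⟩
        exact ⟨y, hy, by simpa using hle⟩
      rw [if_neg (by simp [hk])]
      have hsp : spec (a :: l) = spec l := by
        simp only [spec]; rw [if_neg hall]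
      rw [hsp]
      simp

-- ===== VERDICT (by name: the statement is the Claim_ definition above) =====
theorem solution_spec : Claim_equal_solution := by
  intro arr _
  unfold Spec_solution
  rw [solution_eq_spec, alt_eq_spec]
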